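-- pv_equiv track=rewrite | github.com/gordiig/Un_Compilers | 4_Lab/analyzer.py | _get_priority
-- ===== SOURCE A (Python) =====
-- from typing import Tuple, List, Optional, Union
--
-- def _get_priority(stack_symbol: str, next_symbol: str) -> Optional[str]:
--     """
--     Приоритеты
--     """
--     sum_ops = ('+', '-')
--     mul_ops = ('*', '/', '%', '^')
--     rel_ops = ('<', '<=', '>', '>=', '<>', '==')
--     numbers = tuple(str(i) for i in range(10))
--
--     if stack_symbol in sum_ops:
--         return '>' if next_symbol in sum_ops + rel_ops + (')', '$') else '<'
--     if stack_symbol in mul_ops: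
--         return '>' if next_symbol in sum_ops + mul_ops + rel_ops + (')', '$') else '<'
--     if stack_symbol in rel_ops:
--         return '>' if next_symbol in rel_ops + (')', '$') else '<'
--     if stack_symbol in numbers:
--         return '>' if next_symbol in sum_ops + mul_ops + rel_ops + (')', '$') else None
--     if stack_symbol == '(':
--         return '<' if next_symbol in sum_ops + mul_ops + rel_ops + numbers + ('(', ')') else None
--     if stack_symbol == ')':
--         return '>' if next_symbol in sum_ops + mul_ops + rel_ops + (')', '$') else None
--     if stack_symbol == '$':
--         return '<' if next_symbol in sum_ops + mul_ops + rel_ops + numbers + ('(', ) else None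
--     return None
-- ===== SOURCE B (Python) =====
-- # B: Floyd precedence functions — the relation is COMPUTED by comparing two numeric
-- # precedence values f(stack) and g(next) instead of being stored/enumerated; a separate
-- # relatedness test says when no relation exists (None).
-- from typing import Optional
--
-- _OPS = ('+', '-', '*', '/', '%', '^', '<', '<=', '>', '>=', '<>', '==')
--
-- # left (stack-side) and right (next-side) precedence values
-- _F = {'+': 4, '-': 4, '*': 6, '/': 6, '%': 6, '^': 6,
--       '<': 2, '<=': 2, '>': 2, '>=': 2, '<>': 2, '==': 2,
--       '(': -1, ')': 6, '$': -1}
-- _G = {'+': 3, '-': 3, '*': 5, '/': 5, '%': 5, '^': 5,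
--       '<': 1, '<=': 1, '>': 1, '>=': 1, '<>': 1, '==': 1,
--       '(': 7, ')': 0, '$': 0}
--
--
-- def _is_num(s: str) -> bool:
--     return len(s) == 1 and '0' <= s <= '9'
--
--
-- def _related(s: str, n: str) -> bool:
--     """Whether a precedence relation exists between s (stack) and n (next)."""
--     if s in _OPS:
--         return True
--     if _is_num(s) or s == ')':          # a finished operand: relate to ops and closers
--         return n in _OPS or n in (')', '$')
--     if s == '(':                         # an open context: relate to anything but $/junk
--         return n in _OPS or _is_num(n) or n in ('(', ')')
--     if s == '$':                         # bottom marker: relate to expression starters/ops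
--         return n in _OPS or _is_num(n) or n == '('
--     return False
--
--
-- def _f(s: str) -> int:
--     return 6 if _is_num(s) else _F[s]
--
--
-- def _g(n: str) -> int:
--     return 7 if _is_num(n) else _G.get(n, 7)
--
--
-- def _get_priority(stack_symbol: str, next_symbol: str) -> Optional[str]:
--     if not _related(stack_symbol, next_symbol):
--         return None
--     return '>' if _f(stack_symbol) > _g(next_symbol) else '<'
-- ===== Notes on version B (the rewrite author's own statement) =====
-- stated objective: alternative
-- what changed: Replaced A's stored relation (if-chain over enumerated tuple unions) by Floyd operator-precedence functions: each symbol gets a numeric left/right precedence value and the relation is computed by comparing f(stack) > g(next), with a separate relatedness test for the None cells.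
import Mathlib
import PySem

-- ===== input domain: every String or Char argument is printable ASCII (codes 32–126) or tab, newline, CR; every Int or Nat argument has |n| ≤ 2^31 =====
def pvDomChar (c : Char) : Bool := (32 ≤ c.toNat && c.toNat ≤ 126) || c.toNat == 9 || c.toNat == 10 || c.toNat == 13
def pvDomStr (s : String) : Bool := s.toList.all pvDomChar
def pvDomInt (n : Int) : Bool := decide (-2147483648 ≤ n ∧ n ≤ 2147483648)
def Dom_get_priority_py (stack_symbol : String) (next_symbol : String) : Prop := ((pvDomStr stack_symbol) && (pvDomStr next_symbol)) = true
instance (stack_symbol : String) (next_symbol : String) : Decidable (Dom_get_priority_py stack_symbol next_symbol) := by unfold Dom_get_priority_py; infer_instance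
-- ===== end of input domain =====

-- B computes the relation with Floyd precedence functions (numeric f/g comparison plus a
-- relatedness test) instead of A's stored membership unions (objective: alternative, same cost).

-- ===== PORT A =====
def get_priority_py (stack_symbol : String) (next_symbol : String) : Option String :=
  let sum_ops : List String := ["+", "-"]
  let mul_ops : List String := ["*", "/", "%", "^"]
  let rel_ops : List String := ["<", "<=", ">", ">=", "<>", "=="]
  let numbers : List String := (PySem.List.pyRange 0 10 1).map PySem.Int.toStr
  if stack_symbol ∈ sum_ops then
    (if next_symbol ∈ sum_ops ++ rel_ops ++ [")", "$"] then some ">" else some "<")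
  else if stack_symbol ∈ mul_ops then
    (if next_symbol ∈ sum_ops ++ mul_ops ++ rel_ops ++ [")", "$"] then some ">" else some "<")
  else if stack_symbol ∈ rel_ops then
    (if next_symbol ∈ rel_ops ++ [")", "$"] then some ">" else some "<")
  else if stack_symbol ∈ numbers then
    (if next_symbol ∈ sum_ops ++ mul_ops ++ rel_ops ++ [")", "$"] then some ">" else none)
  else if stack_symbol = "(" then
    (if next_symbol ∈ sum_ops ++ mul_ops ++ rel_ops ++ numbers ++ ["(", ")"] then some "<" else none)
  else if stack_symbol = ")" then
    (if next_symbol ∈ sum_ops ++ mul_ops ++ rel_ops ++ [")", "$"] then some ">" else none)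
  else if stack_symbol = "$" then
    (if next_symbol ∈ sum_ops ++ mul_ops ++ rel_ops ++ numbers ++ ["("] then some "<" else none)
  else none

-- ===== PORT B =====
def pvOps : List String := ["+", "-", "*", "/", "%", "^", "<", "<=", ">", ">=", "<>", "=="]

-- left (stack-side) and right (next-side) precedence values (the dicts _F and _G of Source B)
def pvF : PySem.Dict String Int :=
  PySem.Dict.ofList [("+", 4), ("-", 4), ("*", 6), ("/", 6), ("%", 6), ("^", 6),
    ("<", 2), ("<=", 2), (">", 2), (">=", 2), ("<>", 2), ("==", 2),
    ("(", -1), (")", 6), ("$", -1)]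
def pvG : PySem.Dict String Int :=
  PySem.Dict.ofList [("+", 3), ("-", 3), ("*", 5), ("/", 5), ("%", 5), ("^", 5),
    ("<", 1), ("<=", 1), (">", 1), (">=", 1), ("<>", 1), ("==", 1),
    ("(", 7), (")", 0), ("$", 0)]

-- len(s)==1 and '0'<=s<='9' (on a length-1 string Python's string order is char order)
def pvIsNum (s : String) : Bool :=
  match s.toList with
  | [c] => '0' ≤ c && c ≤ '9'
  | _ => false

def pvRelated (s n : String) : Bool :=
  if s ∈ pvOps then true
  else if pvIsNum s || s == ")" then decide (n ∈ pvOps) || n == ")" || n == "$"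
  else if s == "(" then decide (n ∈ pvOps) || pvIsNum n || n == "(" || n == ")"
  else if s == "$" then decide (n ∈ pvOps) || pvIsNum n || n == "("
  else false

-- _F[s]: the KeyError branch is unreachable (only called when _related holds and s is not a number)
def pvf (s : String) : Int := if pvIsNum s then 6 else (PySem.Dict.get? pvF s).getD 0
def pvg (n : String) : Int := if pvIsNum n then 7 else PySem.Dict.getD pvG n 7

def get_priority_py_alt (stack_symbol : String) (next_symbol : String) : Option String :=
  if !(pvRelated stack_symbol next_symbol) then none
  else if pvf stack_symbol > pvg next_symbol then some ">" else some "<"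

-- ===== PRECONDITION & SPEC =====
def Spec_get_priority_py (stack_symbol : String) (next_symbol : String) (out : Option String) : Prop := out = get_priority_py_alt stack_symbol next_symbol
instance (stack_symbol : String) (next_symbol : String) (out : Option String) : Decidable (Spec_get_priority_py stack_symbol next_symbol out) := by unfold Spec_get_priority_py; infer_instance

-- ===== CLAIM =====
def Claim_equal_get_priority_py : Prop := ∀ (stack_symbol : String) (next_symbol : String), Dom_get_priority_py stack_symbol next_symbol → Spec_get_priority_py stack_symbol next_symbol (get_priority_py stack_symbol next_symbol)

-- ===== LEMMAS AND PROOFS =====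

-- every symbol either program treats specially
def pvAllSyms : List String :=
  ["+", "-", "*", "/", "%", "^", "<", "<=", ">", ">=", "<>", "==",
   "0", "1", "2", "3", "4", "5", "6", "7", "8", "9", "(", ")", "$"]

theorem pvDigitChar (c : Char) (h : ('0' ≤ c && c ≤ '9') = true) :
    c ∈ ['0','1','2','3','4','5','6','7','8','9'] := by
  simp only [Bool.and_eq_true, decide_eq_true_eq, Char.le_def, UInt32.le_iff_toNat_le] at h
  have e0 : ('0':Char).val.toNat = 48 := rfl
  have e9 : ('9':Char).val.toNat = 57 := rfl
  rw [e0, e9] at h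
  have hv : c.toNat = 48 ∨ c.toNat = 49 ∨ c.toNat = 50 ∨ c.toNat = 51 ∨ c.toNat = 52 ∨
      c.toNat = 53 ∨ c.toNat = 54 ∨ c.toNat = 55 ∨ c.toNat = 56 ∨ c.toNat = 57 := by
    unfold Char.toNat; omega
  have key : ∀ m, c.toNat = m → c = Char.ofNat m := by
    intro m hm; rw [← hm, Char.ofNat_toNat]
  rcases hv with h|h|h|h|h|h|h|h|h|h <;> rw [key _ h] <;> decide

theorem pvIsNum_mem (s : String) (h : pvIsNum s = true) : s ∈ pvAllSyms := by
  unfold pvIsNum at h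
  rcases hl : s.toList with _ | ⟨c, rest⟩
  · rw [hl] at h; simp at h
  · rcases rest with _ | ⟨c2, rest2⟩
    · rw [hl] at h
      have hc := pvDigitChar c h
      have hs : s = String.ofList [c] := by
        have := congrArg String.ofList hl
        simpa using this
      fin_cases hc <;> rw [hs] <;> decide
    · rw [hl] at h; simp at h

theorem pvIsNum_false (s : String) (h : s ∉ pvAllSyms) : pvIsNum s = false := by
  cases hn : pvIsNum s
  · rfl
  · exact absurd (pvIsNum_mem s hn) h

theorem pvNumbers_eq : (PySem.List.pyRange 0 10 1).map PySem.Int.toStr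
    = ["0", "1", "2", "3", "4", "5", "6", "7", "8", "9"] := by decide

theorem get_priority_py_spec : Claim_equal_get_priority_py := by
  intro s n _
  unfold Spec_get_priority_py
  by_cases hs : s ∈ pvAllSyms
  · by_cases hn : n ∈ pvAllSyms
    · fin_cases hs <;> fin_cases hn <;> decide
    · have hnum := pvIsNum_false n hn
      simp only [pvAllSyms, List.mem_cons, List.not_mem_nil, or_false, not_or] at hn
      obtain ⟨h1,h2,h3,h4,h5,h6,h7,h8,h9,h10,h11,h12,h13,h14,h15,h16,h17,h18,h19,h20,h21,h22,h23⟩ := hn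
      fin_cases hs <;>
        simp [get_priority_py, get_priority_py_alt, pvRelated, pvf, pvg, pvOps, pvNumbers_eq,
          pvG, pvF, PySem.Dict.ofList, PySem.Dict.update, List.foldl, PySem.Dict.getD_insert,
          hnum, h1,h2,h3,h4,h5,h6,h7,h8,h9,h10,h11,h12,h13,h14,h15,h16,h17,h18,h19,h20,h21,h22,h23] <;>
        decide
  · have hnum := pvIsNum_false s hs
    simp only [pvAllSyms, List.mem_cons, List.not_mem_nil, or_false, not_or] at hs
    obtain ⟨h1,h2,h3,h4,h5,h6,h7,h8,h9,h10,h11,h12,h13,h14,h15,h16,h17,h18,h19,h20,h21,h22,h23⟩ := hs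
    simp [get_priority_py, get_priority_py_alt, pvRelated, pvOps, pvNumbers_eq, hnum,
      h1,h2,h3,h4,h5,h6,h7,h8,h9,h10,h11,h12,h13,h14,h15,h16,h17,h18,h19,h20,h21,h22,h23]
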